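-- pv_equiv track=rewrite | github.com/anshu908/Chatbot | nexichat/modules/chatbot.py | to_small_caps
-- ===== SOURCE A (Python) =====
-- def to_small_caps(text):
--     small_caps = {
--         'a': 'ᴀ', 'b': 'ʙ', 'c': 'ᴄ', 'd': 'ᴅ', 'e': 'ᴇ', 'f': 'ғ', 'g': 'ɢ', 'h': 'ʜ',
--         'i': 'ɪ', 'j': 'ᴊ', 'k': 'ᴋ', 'l': 'ʟ', 'm': 'ᴍ', 'n': 'ɴ', 'o': 'ᴏ', 'p': 'ᴘ',
--         'q': 'ǫ', 'r': 'ʀ', 's': 's', 't': 'ᴛ', 'u': 'ᴜ', 'v': 'ᴠ', 'w': 'ᴡ', 'x': 'x',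
--         'y': 'ʏ', 'z': 'ᴢ'
--     }
--     words = text.split()
--     transformed_words = [''.join(small_caps.get(char, char) for char in word.lower()) for word in words]
--     return ' '.join(transformed_words)
-- ===== SOURCE B (Python) =====
-- _SC = "\u1d00\u0299\u1d04\u1d05\u1d07\u0493\u0262\u029c\u026a\u1d0a\u1d0b\u029f\u1d0d\u0274\u1d0f\u1d18\u01eb\u0280s\u1d1b\u1d1c\u1d20\u1d21x\u028f\u1d22"
--
-- def to_small_caps(text):
--     # one left-to-right scan with a pending-separator state machine:
--     # whitespace runs set a pending flag (only after the first word has begun);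
--     # a non-space char first flushes the pending single space, then is emitted
--     # lowered-and-mapped via ord arithmetic into the small-caps alphabet string.
--     out = []
--     started = False
--     pending = False
--     for ch in text:
--         if ch.isspace():
--             pending = started
--         else:
--             if pending:
--                 out.append(' ')
--                 pending = False
--             o = ord(ch)
--             if 65 <= o <= 90:
--                 o += 32
--             out.append(_SC[o - 97] if 97 <= o <= 122 else ch)
--             started = True
--     return ''.join(out)
-- ===== Notes on version B (the rewrite author's own statement) =====
-- stated objective: alternative
-- what changed: Replaces A's pipeline (split into a word list, nested per-word/per-char comprehension with dict lookups, then joining the words) by a single left-to-right scan carrying explicit state flags (started, pending-separator): whitespace runs only set a flag, each non-space char first flushes at most one pending separator and is then lowered and mapped via ord arithmetic indexing into a 26-char small-caps alphabet string, so no word list, no dict and no join of words is ever built.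
import Mathlib
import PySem

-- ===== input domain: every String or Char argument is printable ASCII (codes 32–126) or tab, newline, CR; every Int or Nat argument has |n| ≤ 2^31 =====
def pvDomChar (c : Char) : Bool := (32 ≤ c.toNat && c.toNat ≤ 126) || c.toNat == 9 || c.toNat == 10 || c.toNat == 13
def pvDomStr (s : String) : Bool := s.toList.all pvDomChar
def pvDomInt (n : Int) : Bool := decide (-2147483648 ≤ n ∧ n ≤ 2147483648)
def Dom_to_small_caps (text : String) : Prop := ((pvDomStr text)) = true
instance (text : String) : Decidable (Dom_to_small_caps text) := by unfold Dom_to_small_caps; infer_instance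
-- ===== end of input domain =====

-- B replaces A's split / per-word map / join pipeline by one left-to-right scan with an
-- explicit pending-separator state machine and ord-arithmetic indexing into the small-caps
-- alphabet; same cost, a genuinely different decomposition.

-- ===== PORT A =====
def capsDict : PySem.Dict Char Char := PySem.Dict.mk
  [('a','ᴀ'), ('b','ʙ'), ('c','ᴄ'), ('d','ᴅ'), ('e','ᴇ'), ('f','ғ'), ('g','ɢ'), ('h','ʜ'),
   ('i','ɪ'), ('j','ᴊ'), ('k','ᴋ'), ('l','ʟ'), ('m','ᴍ'), ('n','ɴ'), ('o','ᴏ'), ('p','ᴘ'),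
   ('q','ǫ'), ('r','ʀ'), ('s','s'), ('t','ᴛ'), ('u','ᴜ'), ('v','ᴠ'), ('w','ᴡ'), ('x','x'),
   ('y','ʏ'), ('z','ᴢ')]

def to_small_caps (text : String) : String :=
  let words := PySem.Str.split₀ text
  let transformed_words := words.map (fun w =>
    String.ofList ((PySem.Str.lower w).toList.map (fun ch => capsDict.getD ch ch)))
  PySem.Str.join " " transformed_words

-- ===== PORT B =====
-- the module-level small-caps alphabet string _SC
def scAlphabet : List Char := "ᴀʙᴄᴅᴇғɢʜɪᴊᴋʟᴍɴᴏᴘǫʀsᴛᴜᴠᴡxʏᴢ".toList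

-- the body of B's for-loop on one char: lower by ord arithmetic, index into _SC
def bMap (ch : Char) : Char :=
  let o := ch.toNat
  let o := if 65 ≤ o ∧ o ≤ 90 then o + 32 else o
  if 97 ≤ o ∧ o ≤ 122 then scAlphabet.getD (o - 97) ch else ch

-- B's scan: out accumulator, started / pending flags, exactly the Python loop
def bGo : List Char → List Char → Bool → Bool → List Char
  | [], out, _started, _pending => out
  | ch :: rest, out, started, pending =>
    if PySem.Chars.isspace ch then bGo rest out started started
    else bGo rest ((if pending then out ++ [' '] else out) ++ [bMap ch]) true false

def to_small_caps_alt (text : String) : String :=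
  String.ofList (bGo text.toList [] false false)

-- ===== PRECONDITION & SPEC =====
def Spec_to_small_caps (text : String) (out : String) : Prop := out = to_small_caps_alt text
instance (text : String) (out : String) : Decidable (Spec_to_small_caps text out) := by unfold Spec_to_small_caps; infer_instance

-- ===== CLAIM (what is proved, stated in full; the proofs are below) =====
def Claim_equal_to_small_caps : Prop := ∀ (text : String), Dom_to_small_caps text → Spec_to_small_caps text (to_small_caps text)

-- ===== LEMMAS AND PROOFS =====

-- A's per-char map (dict lookup after per-word lower)
def fA (c : Char) : Char :=
  capsDict.getD (PySem.Chars.lowerChar c) (PySem.Chars.lowerChar c)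

lemma char_eq_of_toNat {c d : Char} (h : c.toNat = d.toNat) : c = d := by
  apply Char.ext
  exact UInt32.toNat_inj.mp h

set_option maxHeartbeats 2000000 in
-- B's ord arithmetic computes exactly A's lower-then-dict-lookup, on every Char
lemma bMap_eq_fA (c : Char) : bMap c = fA c := by
  by_cases hu : 65 ≤ c.toNat ∧ c.toNat ≤ 90
  · obtain ⟨h1, h2⟩ := hu
    interval_cases h : c.toNat <;>
      · have hv : (Char.ofNat c.toNat).toNat = c.toNat := by
          rw [Char.toNat_ofNat, if_pos]; exact Or.inl (by omega)
        rw [char_eq_of_toNat hv.symm, h]; decide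
  · by_cases hl : 97 ≤ c.toNat ∧ c.toNat ≤ 122
    · obtain ⟨h1, h2⟩ := hl
      interval_cases h : c.toNat <;>
        · have hv : (Char.ofNat c.toNat).toNat = c.toNat := by
            rw [Char.toNat_ofNat, if_pos]; exact Or.inl (by omega)
          rw [char_eq_of_toNat hv.symm, h]; decide
    · -- not a letter: both sides are c itself
      have hb : bMap c = c := by
        simp only [bMap, if_neg hu]
        rw [if_neg hl]
      have hlow : PySem.Chars.lowerChar c = c := by
        unfold PySem.Chars.lowerChar
        rw [if_neg]
        intro hup
        simp only [PySem.Chars.isupper, Bool.and_eq_true, decide_eq_true_eq] at hup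
        obtain ⟨ha, hz⟩ := hup
        rw [Char.le_def] at ha hz
        exact hu ⟨ha, hz⟩
      have hne : ∀ d : Char, d ∈ (['a','b','c','d','e','f','g','h','i','j','k','l','m',
          'n','o','p','q','r','s','t','u','v','w','x','y','z'] : List Char) → c ≠ d := by
        intro d hd hcd
        subst hcd
        fin_cases hd <;> simp_all <;> omega
      have hnone : capsDict.get? c = none := by
        have h1 := hne 'a' (by decide); have h2 := hne 'b' (by decide)
        have h3 := hne 'c' (by decide); have h4 := hne 'd' (by decide)
        have h5 := hne 'e' (by decide); have h6 := hne 'f' (by decide)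
        have h7 := hne 'g' (by decide); have h8 := hne 'h' (by decide)
        have h9 := hne 'i' (by decide); have h10 := hne 'j' (by decide)
        have h11 := hne 'k' (by decide); have h12 := hne 'l' (by decide)
        have h13 := hne 'm' (by decide); have h14 := hne 'n' (by decide)
        have h15 := hne 'o' (by decide); have h16 := hne 'p' (by decide)
        have h17 := hne 'q' (by decide); have h18 := hne 'r' (by decide)
        have h19 := hne 's' (by decide); have h20 := hne 't' (by decide)
        have h21 := hne 'u' (by decide); have h22 := hne 'v' (by decide)
        have h23 := hne 'w' (by decide); have h24 := hne 'x' (by decide)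
        have h25 := hne 'y' (by decide); have h26 := hne 'z' (by decide)
        simp [capsDict, PySem.Dict.get?,
              Ne.symm h1, Ne.symm h2, Ne.symm h3, Ne.symm h4, Ne.symm h5, Ne.symm h6,
              Ne.symm h7, Ne.symm h8, Ne.symm h9, Ne.symm h10, Ne.symm h11, Ne.symm h12,
              Ne.symm h13, Ne.symm h14, Ne.symm h15, Ne.symm h16, Ne.symm h17, Ne.symm h18,
              Ne.symm h19, Ne.symm h20, Ne.symm h21, Ne.symm h22, Ne.symm h23, Ne.symm h24,
              Ne.symm h25, Ne.symm h26]
      rw [hb]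
      unfold fA
      rw [hlow, PySem.Dict.getD, hnone, Option.getD_none]

-- ' '-intercalation of one more word at the back
lemma inter_snoc (ws : List (List Char)) (w : List Char) :
    List.intercalate [' '] (ws ++ [w]) =
      List.intercalate [' '] ws ++ (if ws = [] then [] else [' ']) ++ w := by
  induction ws with
  | nil => simp [List.intercalate]
  | cons a t ih =>
    cases t with
    | nil => simp [List.intercalate, List.intersperse]
    | cons b t' =>
      have hcc : ∀ (x y : List Char) (u : List (List Char)),
          List.intercalate [' '] (x :: y :: u) = x ++ [' '] ++ List.intercalate [' '] (y :: u) := by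
        intro x y u; simp [List.intercalate, List.intersperse]
      simp only [List.cons_append, hcc]
      simp only [List.cons_append] at ih
      simp [ih, List.append_assoc]

-- the invariant linking B's scan state to A's split₀.go word accumulator
def outInv (cur : List Char) (acc : List (List Char)) : List Char :=
  List.intercalate [' '] (acc.reverse.map (List.map fA)) ++
    (if cur = [] then [] else (if acc = [] then [] else [' ']) ++ (cur.reverse.map fA))

lemma bGo_invariant (s : List Char) : ∀ (cur : List Char) (acc : List (List Char)),
    bGo s (outInv cur acc) (decide (acc ≠ [] ∨ cur ≠ [])) (decide (cur = [] ∧ acc ≠ []))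
      = List.intercalate [' '] ((PySem.Chars.split₀.go s cur acc).map (List.map fA)) := by
  induction s with
  | nil =>
    intro cur acc
    by_cases hc : cur = []
    · simp [bGo, PySem.Chars.split₀.go, hc, outInv]
    · have h1 : cur.isEmpty = false := by simpa [List.isEmpty_iff] using hc
      simp only [bGo, PySem.Chars.split₀.go, h1, Bool.false_eq_true, if_false, if_neg hc,
                 outInv, List.reverse_cons]
      rw [List.map_append, List.map_cons, List.map_nil, inter_snoc]
      simp
  | cons c rest ih =>
    intro cur acc
    simp only [bGo]
    by_cases hs : PySem.Chars.isspace c = true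
    · simp only [hs, if_true, PySem.Chars.split₀.go]
      by_cases hc : cur = []
      · subst hc
        have h1 : (List.nil (α := Char)).isEmpty = true := rfl
        simp only [h1, if_true]
        have := ih [] acc
        simp only [outInv, if_pos rfl] at this ⊢
        convert this using 2 <;> simp
      · have h1 : cur.isEmpty = false := by simpa [List.isEmpty_iff] using hc
        simp only [h1, Bool.false_eq_true, if_false]
        have := ih [] (cur.reverse :: acc)
        have hout : outInv [] (cur.reverse :: acc) = outInv cur acc := by
          simp only [outInv, if_pos rfl, List.reverse_cons, List.map_append,
                     List.map_cons, List.map_nil]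
          rw [inter_snoc]
          simp [hc]
        rw [hout] at this
        convert this using 2 <;> simp [hc]
    · simp only [hs, Bool.false_eq_true, if_false, PySem.Chars.split₀.go]
      have := ih (c :: cur) acc
      have hout : (if decide (cur = [] ∧ acc ≠ []) = true then outInv cur acc ++ [' ']
            else outInv cur acc) ++ [bMap c] = outInv (c :: cur) acc := by
        rw [bMap_eq_fA]
        by_cases hc : cur = []
        · subst hc
          by_cases ha : acc = []
          · simp [outInv, ha]
          · simp [outInv, ha]
        · have hpend : ¬ (cur = [] ∧ acc ≠ []) := fun h => hc h.1
          simp only [decide_eq_true_eq, if_neg hpend, outInv, if_neg hc,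
                     List.cons_ne_nil, not_false_iff, List.reverse_cons, List.map_append]
          simp
      rw [hout]
      convert this using 2 <;> simp
-- ===== VERDICT (by name: the statement is the Claim_ definition above) =====
theorem to_small_caps_spec : Claim_equal_to_small_caps := by
  intro text _
  unfold Spec_to_small_caps to_small_caps to_small_caps_alt
  have key := bGo_invariant text.toList [] []
  simp only [outInv] at key
  norm_num at key
  have key' : bGo text.toList [] false false =
      [' '].intercalate (List.map (List.map fA) (PySem.Chars.split₀.go text.toList [] [])) := by
    simpa [List.intercalate] using key
  rw [key']
  simp only [PySem.Str.join, PySem.Str.split₀, PySem.Chars.join, PySem.Chars.split₀,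
             List.intercalate]
  congr 1
  simp only [List.map_map, Function.comp_def, String.toList_ofList, PySem.Str.toList_lower,
             PySem.Chars.lower, List.map_map]
  rfl
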